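-- pv_equiv track=rewrite | github.com/avishek-mondal/ctci_python | c17/p17_21_vol_histogram.py | vol_between
-- ===== SOURCE A (Python) =====
-- import typing as ty
--
-- def vol_between(hist: ty.List, start: int, end: int):
--     if start >= end:
--         return 0
--     smaller = min(hist[start], hist[end])
--
--     tot = 0
--     for i in range(start + 1, end):
--         tot += smaller - hist[i]
--
--     return tot
-- ===== SOURCE B (Python) =====
-- def vol_between(hist, start, end):
--     # Divide and conquer: the water over the interior index range is the sum
--     # of the water over its two halves (each column holds smaller - height).
--     if start >= end:
--         return 0
--     smaller = min(hist[start], hist[end])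
--     return _water(hist, smaller, start + 1, end - 1)
--
-- def _water(hist, smaller, lo, hi):
--     # water over the inclusive index range [lo, hi]
--     if lo > hi:
--         return 0
--     if lo == hi:
--         return smaller - hist[lo]
--     mid = (lo + hi) // 2
--     return _water(hist, smaller, lo, mid) + _water(hist, smaller, mid + 1, hi)
-- ===== Notes on version B (the rewrite author's own statement) =====
-- stated objective: alternative
-- what changed: B replaces A's single left-to-right accumulating loop by a recursive divide-and-conquer that splits the interior index range at its midpoint and adds the water of the two halves.
import Mathlib
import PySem

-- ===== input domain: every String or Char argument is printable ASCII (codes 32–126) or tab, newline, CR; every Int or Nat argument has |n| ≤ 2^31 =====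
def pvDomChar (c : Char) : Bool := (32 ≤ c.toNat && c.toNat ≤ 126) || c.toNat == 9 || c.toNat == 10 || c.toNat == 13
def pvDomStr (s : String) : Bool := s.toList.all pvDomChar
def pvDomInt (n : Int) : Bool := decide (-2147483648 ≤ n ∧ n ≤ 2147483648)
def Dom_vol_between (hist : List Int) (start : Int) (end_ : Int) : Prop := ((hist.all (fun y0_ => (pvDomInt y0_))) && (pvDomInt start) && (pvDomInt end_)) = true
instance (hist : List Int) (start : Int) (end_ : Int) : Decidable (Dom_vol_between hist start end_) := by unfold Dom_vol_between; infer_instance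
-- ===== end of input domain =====

-- B replaces A's accumulating loop by a divide-and-conquer recursion on the interior index range; objective: alternative.
-- ===== PORT A =====
def vol_between (hist : List Int) (start : Int) (end_ : Int) : Int :=
  if start ≥ end_ then 0
  else
    let smaller := min (PySem.List.pyGetD hist start 0) (PySem.List.pyGetD hist end_ 0)
    (PySem.List.pyRange (start + 1) end_ 1).foldl
      (fun tot i => tot + (smaller - PySem.List.pyGetD hist i 0)) 0

-- ===== PORT B =====
-- _water: water over the inclusive index range [lo, hi]
def volWater (hist : List Int) (smaller lo hi : Int) : Int :=
  if lo > hi then 0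
  else if lo = hi then smaller - PySem.List.pyGetD hist lo 0
  else
    let mid := PySem.Int.floordiv (lo + hi) 2
    volWater hist smaller lo mid + volWater hist smaller (mid + 1) hi
termination_by (hi - lo + 1).toNat
decreasing_by
  · have h2 : (0:Int) < 2 := by omega
    have := PySem.Int.floordiv_eq_ediv_of_pos (a := lo + hi) h2
    simp only [this] at *
    omega
  · have h2 : (0:Int) < 2 := by omega
    have := PySem.Int.floordiv_eq_ediv_of_pos (a := lo + hi) h2
    simp only [this] at *
    omega

def vol_between_alt (hist : List Int) (start : Int) (end_ : Int) : Int :=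
  if start ≥ end_ then 0
  else
    let smaller := min (PySem.List.pyGetD hist start 0) (PySem.List.pyGetD hist end_ 0)
    volWater hist smaller (start + 1) (end_ - 1)

-- ===== PRECONDITION & SPEC =====
-- A raises IndexError when start < end and either endpoint index is outside [-len, len); Pre_ excludes exactly those inputs.
def Pre_vol_between (hist : List Int) (start : Int) (end_ : Int) : Prop :=
  start ≥ end_ ∨ (PySem.Raise.InRange hist.length start ∧ PySem.Raise.InRange hist.length end_)
instance (hist : List Int) (start : Int) (end_ : Int) : Decidable (Pre_vol_between hist start end_) := by unfold Pre_vol_between; infer_instance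
def pvWitness_vol_between : List Int × Int × Int := ([3, 0, 1, 0, 4], 0, 4)

def Spec_vol_between (hist : List Int) (start : Int) (end_ : Int) (out : Int) : Prop := out = vol_between_alt hist start end_
instance (hist : List Int) (start : Int) (end_ : Int) (out : Int) : Decidable (Spec_vol_between hist start end_ out) := by unfold Spec_vol_between; infer_instance

-- ===== CLAIM (what is proved, stated in full; the proofs are below) =====
def Claim_equal_vol_between : Prop := ∀ (hist : List Int) (start : Int) (end_ : Int), Dom_vol_between hist start end_ → Pre_vol_between hist start end_ → Spec_vol_between hist start end_ (vol_between hist start end_)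

-- ===== LEMMAS AND PROOFS =====

-- A's foldl over any index list is the sum of the per-column water.
theorem foldl_water_eq_sum (h : Int → Int) (s : Int) :
    ∀ (l : List Int) (acc : Int),
      l.foldl (fun tot i => tot + (s - h i)) acc
        = acc + (l.map (fun i => s - h i)).sum := by
  intro l
  induction l with
  | nil => intro acc; simp
  | cons x xs ih =>
      intro acc
      simp [List.foldl_cons, ih]
      ring

-- The divide-and-conquer recursion computes the same per-column sum over [lo, hi].
theorem volWater_eq_sum (hist : List Int) (s : Int) :
    ∀ n (lo hi : Int), (hi - lo + 1).toNat ≤ n →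
      volWater hist s lo hi
        = ((PySem.List.pyRange lo (hi + 1) 1).map
            (fun i => s - PySem.List.pyGetD hist i 0)).sum := by
  intro n
  induction n with
  | zero =>
      intro lo hi hle
      have hgt : lo > hi := by omega
      rw [volWater]
      simp [hgt, PySem.List.pyRange_one_eq_nil (by omega : hi + 1 ≤ lo)]
  | succ n ih =>
      intro lo hi hle
      rw [volWater]
      by_cases hgt : lo > hi
      · simp [hgt, PySem.List.pyRange_one_eq_nil (by omega : hi + 1 ≤ lo)]
      · by_cases heq : lo = hi
        · subst heq
          simp [PySem.List.pyRange_one_singleton]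
        · have h2 : (0:Int) < 2 := by omega
          have hmid : PySem.Int.floordiv (lo + hi) 2 = (lo + hi) / 2 :=
            PySem.Int.floordiv_eq_ediv_of_pos h2
          simp only [hgt, heq, if_false, hmid]
          set mid := (lo + hi) / 2 with hm
          have hlo : lo ≤ mid := by omega
          have hhi : mid < hi := by omega
          rw [ih lo mid (by omega), ih (mid + 1) hi (by omega)]
          rw [PySem.List.pyRange_one_append lo (mid + 1) (hi + 1) (by omega) (by omega)]
          simp

-- ===== VERDICT (by name: the statement is the Claim_ definition above) =====
theorem vol_between_spec : Claim_equal_vol_between := by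
  intro hist start end_ _ _
  unfold Spec_vol_between vol_between vol_between_alt
  by_cases hlt : start ≥ end_
  · simp [hlt]
  · simp only [hlt, if_false]
    rw [foldl_water_eq_sum,
        volWater_eq_sum hist _ (end_ - 1 - (start + 1) + 1).toNat (start + 1) (end_ - 1) le_rfl]
    have : end_ - 1 + 1 = end_ := by omega
    rw [this]
    ring
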